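-- pv_equiv track=rewrite | github.com/TimoVanBeelen/Python_BIT | python_target.py | sum_of_diff
-- ===== SOURCE A (Python) =====
-- def sum_of_diff(list_of_numbers):
--     count = 0
--     if len(list_of_numbers)%2 == 1:
--         list_of_numbers = list_of_numbers[:-1]
--
--     odd_index = False
--     for num in list_of_numbers:
--         # Add or subtract on whether it is at an odd or even index in the list
--         if odd_index:
--             count += num
--         else:
--             count -= num
--
--         odd_index = not odd_index  # Change the index bool
--
--     return count
-- ===== SOURCE B (Python) =====
-- def sum_of_diff(list_of_numbers):
--     # Pair up consecutive elements (zip of one iterator with itself drops a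
--     # trailing unmatched element) and sum the per-pair differences.
--     it = iter(list_of_numbers)
--     return sum(o - e for e, o in zip(it, it))
-- ===== Notes on version B (the rewrite author's own statement) =====
-- stated objective: idiomatic
-- what changed: Replaces the length-parity trim plus flag-toggling accumulator loop with a direct pairwise traversal: zip an iterator with itself to form consecutive (even,odd) pairs (the unmatched trailing element drops out automatically) and sum the per-pair differences.
import Mathlib
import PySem

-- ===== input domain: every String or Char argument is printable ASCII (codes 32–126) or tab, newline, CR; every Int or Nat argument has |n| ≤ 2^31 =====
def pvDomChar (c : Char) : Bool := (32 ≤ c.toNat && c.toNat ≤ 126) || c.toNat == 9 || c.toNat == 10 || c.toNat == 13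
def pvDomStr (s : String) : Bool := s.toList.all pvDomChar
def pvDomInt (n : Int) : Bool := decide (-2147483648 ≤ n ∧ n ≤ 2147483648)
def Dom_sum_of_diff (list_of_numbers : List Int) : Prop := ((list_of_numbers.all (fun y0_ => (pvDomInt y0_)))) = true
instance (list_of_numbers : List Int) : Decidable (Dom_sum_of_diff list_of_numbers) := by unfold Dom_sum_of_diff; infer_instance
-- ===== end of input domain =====

-- ===== PORT A =====
-- A: trim off the last element if the length is odd, then a toggle-flag loop.
def sum_of_diff (list_of_numbers : List Int) : Int :=
  let ys := if list_of_numbers.length % 2 == 1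
            then PySem.List.slice list_of_numbers none (some (-1))
            else list_of_numbers
  let r := ys.foldl
    (fun (s : Int × Bool) num =>
      (if s.2 then s.1 + num else s.1 - num, !s.2)) (0, false)
  r.1

-- ===== PORT B =====
-- B: chunk the list into consecutive (even, odd) pairs — 'zip(it, it)' on one
-- iterator, ported by hand as the obvious two-at-a-time recursion (exact:
-- a trailing unmatched element is dropped, as zip truncates) — then sum the
-- per-pair differences ('sum' = foldl (+) 0).
def pvPairs : List Int → List (Int × Int)
  | a :: b :: rest => (a, b) :: pvPairs rest
  | _ => []

def sum_of_diff_alt (list_of_numbers : List Int) : Int :=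
  ((pvPairs list_of_numbers).map (fun p => p.2 - p.1)).foldl (· + ·) 0

-- ===== PRECONDITION & SPEC =====
def Spec_sum_of_diff (list_of_numbers : List Int) (out : Int) : Prop := out = sum_of_diff_alt list_of_numbers
instance (list_of_numbers : List Int) (out : Int) : Decidable (Spec_sum_of_diff list_of_numbers out) := by unfold Spec_sum_of_diff; infer_instance

-- ===== CLAIM (what is proved, stated in full; the proofs are below) =====
def Claim_equal_sum_of_diff : Prop := ∀ (list_of_numbers : List Int), Dom_sum_of_diff list_of_numbers → Spec_sum_of_diff list_of_numbers (sum_of_diff list_of_numbers)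

-- ===== LEMMAS AND PROOFS =====

-- Shift the accumulator out of a sum fold.
theorem pvFoldlAdd (L : List Int) (s : Int) :
    L.foldl (· + ·) s = s + L.foldl (· + ·) 0 := by
  induction L generalizing s with
  | nil => simp
  | cons x t ih => simp only [List.foldl]; rw [ih (s + x), ih (0 + x)]; ring

-- Dropping the unmatched trailing element of an odd-length list leaves the pairs unchanged.
theorem pvPairs_dropLast (xs : List Int) (h : xs.length % 2 = 1) :
    pvPairs xs.dropLast = pvPairs xs := by
  induction xs using pvPairs.induct with
  | case1 a b rest ih =>
      match rest with
      | [] => simp at h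
      | c :: t =>
          have h' : (c :: t).length % 2 = 1 := by
            simp only [List.length_cons] at h ⊢; omega
          simp only [List.dropLast, pvPairs]
          exact congrArg _ (ih h')
  | case2 xs h1 =>
      rcases xs with - | ⟨a, t⟩
      · simp [pvPairs]
      · rcases t with - | ⟨b, t⟩
        · simp [pvPairs, List.dropLast]
        · exact absurd rfl (h1 a b t)

-- The toggle loop of A, on an even-length list, computes init plus the pair differences.
theorem pvLoop_even (xs : List Int) (hx : xs.length % 2 = 0) (c : Int) :
    (xs.foldl (fun (s : Int × Bool) num =>
        (if s.2 then s.1 + num else s.1 - num, !s.2)) (c, false)).1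
      = c + ((pvPairs xs).map (fun p => p.2 - p.1)).foldl (· + ·) 0 := by
  induction xs using pvPairs.induct generalizing c with
  | case1 a b rest ih =>
      have h' : rest.length % 2 = 0 := by
        simp only [List.length_cons] at hx ⊢; omega
      simp only [List.foldl, pvPairs, List.map, Bool.not_false, Bool.not_true,
        Bool.false_eq_true, if_false, if_true]
      rw [ih h' (c - a + b), pvFoldlAdd _ (0 + (b - a))]
      ring
  | case2 xs h1 =>
      rcases xs with - | ⟨a, t⟩
      · simp [pvPairs]
      · rcases t with - | ⟨b, t⟩
        · simp at hx
        · exact absurd rfl (h1 a b t)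

-- ===== VERDICT (by name: the statement is the Claim_ definition above) =====
theorem sum_of_diff_spec : Claim_equal_sum_of_diff := by
  intro xs _
  unfold Spec_sum_of_diff sum_of_diff sum_of_diff_alt
  by_cases h : xs.length % 2 = 1
  · simp only [h, beq_iff_eq, if_pos, PySem.List.slice_to_neg_one]
    have hdl : xs.dropLast.length % 2 = 0 := by
      rcases xs with - | ⟨a, t⟩
      · simp at h
      · simp only [List.length_dropLast]
        simp only [List.length] at h ⊢
        omega
    rw [pvLoop_even _ hdl 0, pvPairs_dropLast xs h]
    ring
  · have h0 : xs.length % 2 = 0 := by omega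
    simp only [h0]
    simp only [show ((0 : Nat) == 1) = false from rfl, if_neg Bool.false_ne_true]
    rw [pvLoop_even _ h0 0]
    ring
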